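-- pv_equiv track=rewrite | github.com/keremuzer/bbm103 | sudoku/sudoku.py | control_region
-- ===== SOURCE A (Python) =====
-- def control_region(board, row_index, col_index):
--     possible_solutions = [1, 2, 3, 4, 5, 6, 7, 8, 9]
--     square_row = row_index // 3
--     square_column = col_index // 3
--     for i in range(square_row * 3, square_row * 3 + 3):
--         for j in range(square_column * 3, square_column * 3 + 3):
--             if board[i][j] in possible_solutions:
--                 possible_solutions.remove(board[i][j])
--     return possible_solutions
-- ===== SOURCE B (Python) =====
-- def control_region(board, row_index, col_index):
--     r = row_index // 3 * 3
--     c = col_index // 3 * 3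
--     present = set()
--     for i in range(r, r + 3):
--         for j in range(c, c + 3):
--             present.add(board[i][j])
--     return [d for d in range(1, 10) if d not in present]
-- ===== Notes on version B (the rewrite author's own statement) =====
-- stated objective: simpler
-- what changed: B collects the box's present digits into a set and then filters the full range 1-9 in a final pass, instead of A's start-full-and-remove-with-repeated-list-scans strategy.
import Mathlib
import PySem

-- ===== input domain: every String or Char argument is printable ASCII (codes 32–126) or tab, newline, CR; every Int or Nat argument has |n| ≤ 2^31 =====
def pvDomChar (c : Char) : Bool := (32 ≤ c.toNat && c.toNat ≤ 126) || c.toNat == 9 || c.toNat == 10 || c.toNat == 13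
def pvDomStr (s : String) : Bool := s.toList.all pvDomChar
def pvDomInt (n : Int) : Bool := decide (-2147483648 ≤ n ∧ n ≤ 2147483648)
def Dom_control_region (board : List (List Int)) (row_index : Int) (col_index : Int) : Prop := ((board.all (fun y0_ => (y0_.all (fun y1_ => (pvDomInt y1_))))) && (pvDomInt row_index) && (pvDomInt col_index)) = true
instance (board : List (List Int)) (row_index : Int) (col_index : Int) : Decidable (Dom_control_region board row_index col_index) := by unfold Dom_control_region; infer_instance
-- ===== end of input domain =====

-- B collects the box's present digits into a set, then filters 1..9 in one final pass (simpler decomposition; same cost).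


-- ===== PORT A =====
def control_region (board : List (List Int)) (row_index : Int) (col_index : Int) : List Int :=
  let square_row := PySem.Int.floordiv row_index 3
  let square_column := PySem.Int.floordiv col_index 3
  (PySem.List.pyRange (square_row * 3) (square_row * 3 + 3) 1).foldl (fun ps i =>
    (PySem.List.pyRange (square_column * 3) (square_column * 3 + 3) 1).foldl (fun ps j =>
      let v := PySem.List.pyGetD (PySem.List.pyGetD board i []) j 0
      if v ∈ ps then (PySem.List.remove? ps v).getD ps else ps) ps)
    [1, 2, 3, 4, 5, 6, 7, 8, 9]

-- ===== PORT B =====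
def control_region_alt (board : List (List Int)) (row_index : Int) (col_index : Int) : List Int :=
  let r := PySem.Int.floordiv row_index 3 * 3
  let c := PySem.Int.floordiv col_index 3 * 3
  let present : PySem.Set Int :=
    (PySem.List.pyRange r (r + 3) 1).foldl (fun s i =>
      (PySem.List.pyRange c (c + 3) 1).foldl (fun s j =>
        PySem.Set.add s (PySem.List.pyGetD (PySem.List.pyGetD board i []) j 0)) s)
      PySem.Set.empty
  (PySem.List.pyRange 1 10 1).filter (fun d => decide (d ∉ present))

-- ===== PRECONDITION & SPEC =====
-- Pre_: every one of the 9 box-cell accesses board[i][j] is in range (else the Python raises IndexError).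
def Pre_control_region (board : List (List Int)) (row_index : Int) (col_index : Int) : Prop :=
  let r := PySem.Int.floordiv row_index 3 * 3
  let c := PySem.Int.floordiv col_index 3 * 3
  ∀ i ∈ PySem.List.pyRange r (r + 3) 1,
    PySem.Raise.InRange board.length i ∧
    ∀ j ∈ PySem.List.pyRange c (c + 3) 1,
      PySem.Raise.InRange (PySem.List.pyGetD board i []).length j
instance (board : List (List Int)) (row_index : Int) (col_index : Int) : Decidable (Pre_control_region board row_index col_index) := by unfold Pre_control_region; infer_instance
def pvWitness_control_region : List (List Int) × Int × Int := ([[5, 0, 0], [0, 3, 0], [0, 0, 9]], 0, 0)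

def Spec_control_region (board : List (List Int)) (row_index : Int) (col_index : Int) (out : List Int) : Prop := out = control_region_alt board row_index col_index
instance (board : List (List Int)) (row_index : Int) (col_index : Int) (out : List Int) : Decidable (Spec_control_region board row_index col_index out) := by unfold Spec_control_region; infer_instance

-- ===== CLAIM (what is proved, stated in full; the proofs are below) =====
def Claim_equal_control_region : Prop := ∀ (board : List (List Int)) (row_index : Int) (col_index : Int), Dom_control_region board row_index col_index → Pre_control_region board row_index col_index → Spec_control_region board row_index col_index (control_region board row_index col_index)

-- ===== LEMMAS AND PROOFS =====

lemma pyRange_three (r : Int) : PySem.List.pyRange r (r + 3) 1 = [r, r + 1, r + 2] := by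
  rw [PySem.List.pyRange_one_cons (by omega), PySem.List.pyRange_one_cons (by omega),
      PySem.List.pyRange_one_cons (by omega), PySem.List.pyRange_one_eq_nil (by omega)]
  norm_num
  omega

lemma foldl_remove_eq_filter (cs L : List Int) (h : L.Nodup) :
    cs.foldl (fun ps v => if v ∈ ps then (PySem.List.remove? ps v).getD ps else ps) L
      = L.filter (fun d => decide (d ∉ cs)) := by
  induction cs generalizing L with
  | nil => simp
  | cons c cs ih =>
    have hstep : (if c ∈ L then (PySem.List.remove? L c).getD L else L) = L.filter (· ≠ c) := by
      by_cases hc : c ∈ L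
      · rw [if_pos hc, PySem.List.remove?_eq_some_erase L c hc, Option.getD_some,
            List.Nodup.erase_eq_filter h]
        congr 1
        funext x
        by_cases hxc : x = c
        · subst hxc; simp
        · simp [bne, hxc]
      · rw [if_neg hc]
        symm
        apply List.filter_eq_self.mpr
        intro x hx
        simp only [decide_eq_true_eq]
        intro hxc; exact hc (hxc ▸ hx)
    rw [List.foldl_cons, hstep, ih _ (h.filter _), List.filter_filter]
    apply List.filter_congr
    intro x hx
    by_cases h1 : x = c <;> by_cases h2 : x ∈ cs <;> simp [h1, h2]

lemma nested_foldl_eq_foldl_cells {β : Type} (f : β → Int → β) (v : Int → Int → Int)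
    (rows cols : List Int) (init : β) :
    rows.foldl (fun s i => cols.foldl (fun s j => f s (v i j)) s) init
      = (rows.flatMap (fun i => cols.map (v i))).foldl f init := by
  induction rows generalizing init with
  | nil => simp
  | cons a rs ih => simp [List.foldl_append, List.foldl_map, ih]

lemma mem_foldl_set_add {d : Int} (cs : List Int) (s : PySem.Set Int) :
    d ∈ cs.foldl PySem.Set.add s ↔ d ∈ s ∨ d ∈ cs := by
  induction cs generalizing s with
  | nil => simp
  | cons c cs ih =>
    rw [List.foldl_cons, ih, PySem.Set.mem_add]
    simp only [List.mem_cons]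
    tauto

-- ===== VERDICT (by name: the statement is the Claim_ definition above) =====
theorem control_region_spec : Claim_equal_control_region := by
  intro board row_index col_index _ _
  unfold Spec_control_region control_region control_region_alt
  simp only [pyRange_three]
  rw [nested_foldl_eq_foldl_cells
        (fun ps w => if w ∈ ps then (PySem.List.remove? ps w).getD ps else ps)
        (fun i j => PySem.List.pyGetD (PySem.List.pyGetD board i []) j 0),
      nested_foldl_eq_foldl_cells PySem.Set.add
        (fun i j => PySem.List.pyGetD (PySem.List.pyGetD board i []) j 0),
      foldl_remove_eq_filter _ _ (by decide),
      show PySem.List.pyRange 1 10 1 = [1, 2, 3, 4, 5, 6, 7, 8, 9] from by decide]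
  apply List.filter_congr
  intro d _
  simp only [decide_eq_decide]
  rw [not_iff_not, mem_foldl_set_add]
  simp [PySem.Set.empty]
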